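-- pv_equiv track=rewrite | github.com/jessr92/advent-of-code-2015 | src/day1.py | part_2
-- ===== SOURCE A (Python) =====
-- def part_2(floors: str) -> int:
--     floor_number = 0
--     position = 1
--     for floor in floors:
--         floor_number = floor_number + 1  if floor == "("  else floor_number - 1
--         if floor_number < 0:
--             break
--         position += 1
--     return position
-- ===== SOURCE B (Python) =====
-- def part_2(floors: str) -> int:
--     # Phase 1: per-character deltas
--     deltas = [1 if c == "(" else -1 for c in floors]
--     # Phase 2: materialise the prefix-sum table
--     prefix = []
--     total = 0
--     for d in deltas:
--         total += d
--         prefix.append(total)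
--     # Phase 3: scan for the first negative cumulative sum (1-based)
--     for i, v in enumerate(prefix):
--         if v < 0:
--             return i + 1
--     return len(prefix) + 1
-- ===== Notes on version B (the rewrite author's own statement) =====
-- stated objective: alternative
-- what changed: Replaced A's fused single-pass loop with early break by three separate phases: map chars to +/-1 deltas, materialise the full prefix-sum table, then scan it for the first negative entry (default len+1).
import Mathlib
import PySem

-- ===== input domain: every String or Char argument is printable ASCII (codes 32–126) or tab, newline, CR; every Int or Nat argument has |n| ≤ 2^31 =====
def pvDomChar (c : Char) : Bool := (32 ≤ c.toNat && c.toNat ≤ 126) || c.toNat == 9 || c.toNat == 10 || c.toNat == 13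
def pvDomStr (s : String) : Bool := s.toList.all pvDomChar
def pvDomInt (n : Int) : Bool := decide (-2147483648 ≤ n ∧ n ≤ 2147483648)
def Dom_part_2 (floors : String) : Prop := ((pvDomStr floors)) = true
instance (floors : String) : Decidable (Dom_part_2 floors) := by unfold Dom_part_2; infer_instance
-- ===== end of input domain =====

-- B replaces A's fused early-exit loop by three phases (deltas, prefix-sum table, scan); alternative decomposition, same cost.

-- ===== PORT A =====
-- A's loop: carries floor_number and position, breaks when floor_number < 0
def part2LoopA : List Char → Int → Int → Int
  | [], _, pos => pos
  | c :: rest, fn, pos =>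
    let fn' := if c = '(' then fn + 1 else fn - 1
    if fn' < 0 then pos else part2LoopA rest fn' (pos + 1)

def part_2 (floors : String) : Int := part2LoopA floors.toList 0 1

-- ===== PORT B =====
-- phase 2 of B: running prefix sums
def prefixSumsB : List Int → Int → List Int
  | [], _ => []
  | d :: ds, t => (t + d) :: prefixSumsB ds (t + d)

-- phase 3 of B: 1-based index of first negative, default one past the end
def firstNegB : List Int → Int → Int
  | [], i => i
  | v :: vs, i => if v < 0 then i else firstNegB vs (i + 1)

def part_2_alt (floors : String) : Int :=
  let deltas := floors.toList.map (fun c => if c = '(' then (1 : Int) else -1)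
  let table := prefixSumsB deltas 0
  firstNegB table 1

-- ===== PRECONDITION & SPEC =====
def Spec_part_2 (floors : String) (out : Int) : Prop := out = part_2_alt floors
instance (floors : String) (out : Int) : Decidable (Spec_part_2 floors out) := by unfold Spec_part_2; infer_instance

-- ===== CLAIM (what is proved, stated in full; the proofs are below) =====
def Claim_equal_part_2 : Prop := ∀ (floors : String), Dom_part_2 floors → Spec_part_2 floors (part_2 floors)

-- ===== LEMMAS AND PROOFS =====
theorem loop_eq (l : List Char) : ∀ (fn pos : Int),
    part2LoopA l fn pos =
      firstNegB (prefixSumsB (l.map (fun c => if c = '(' then (1 : Int) else -1)) fn) pos := by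
  induction l with
  | nil => intro fn pos; rfl
  | cons c rest ih =>
    intro fn pos
    simp only [part2LoopA, List.map, prefixSumsB, firstNegB]
    by_cases h : c = '('
    · simp [h, ih]
    · simp [h, ih, sub_eq_add_neg]

-- ===== VERDICT (by name: the statement is the Claim_ definition above) =====
theorem part_2_spec : Claim_equal_part_2 := by
  intro floors _
  unfold Spec_part_2 part_2 part_2_alt
  exact loop_eq floors.toList 0 1
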